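-- pv_equiv track=rewrite | github.com/TENTA9/ThinkPRM_laptop | add_conf.py | get_cot_prefix_before_step
-- ===== SOURCE A (Python) =====
-- def is_verification_chunk(chunk):
--     """검증 청크인지 확인 (Step k:로 시작하고 \\boxed{}로 끝나는지)"""
--     chunk = chunk.strip()
--     if not chunk.startswith("Step"):
--         return False
--     if "\\boxed{" not in chunk:
--         return False
--     return True
--
-- def get_cot_prefix_before_step(cot_chunks, step_index):
--     """
--     step_index번째 검증 청크 직전까지의 모든 내용을 반환
--     (모델이 이미 생성한 것처럼 인식하도록)
--
--     Args:
--         cot_chunks: 전체 cot_chunks 리스트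
--         step_index: 검증하려는 스텝의 인덱스 (0-based)
--
--     Returns:
--         step_index 직전까지의 모든 청크를 연결한 문자열
--     """
--     prefix_chunks = []
--     verification_count = 0
--
--     for chunk in cot_chunks[1:]:
--         if is_verification_chunk(chunk):
--             if verification_count == step_index:
--                 # 목표 검증 청크에 도달하면 중단
--                 break
--             verification_count += 1
--         prefix_chunks.append(chunk)
--
--     return ''.join(prefix_chunks)
-- ===== SOURCE B (Python) =====
-- def is_verification_chunk(chunk):
--     chunk = chunk.strip()
--     if not chunk.startswith("Step"):
--         return False
--     if "\\boxed{" not in chunk: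
--         return False
--     return True
--
-- def get_cot_prefix_before_step(cot_chunks, step_index):
--     tail = cot_chunks[1:]
--     positions = [i for i, chunk in enumerate(tail) if is_verification_chunk(chunk)]
--     if 0 <= step_index < len(positions):
--         return ''.join(tail[:positions[step_index]])
--     return ''.join(tail)
-- ===== Notes on version B (the rewrite author's own statement) =====
-- stated objective: alternative
-- what changed: Replaces the count-and-break accumulation loop with a one-pass index table of verification-chunk positions followed by a slice-and-join lookup.
import Mathlib
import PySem

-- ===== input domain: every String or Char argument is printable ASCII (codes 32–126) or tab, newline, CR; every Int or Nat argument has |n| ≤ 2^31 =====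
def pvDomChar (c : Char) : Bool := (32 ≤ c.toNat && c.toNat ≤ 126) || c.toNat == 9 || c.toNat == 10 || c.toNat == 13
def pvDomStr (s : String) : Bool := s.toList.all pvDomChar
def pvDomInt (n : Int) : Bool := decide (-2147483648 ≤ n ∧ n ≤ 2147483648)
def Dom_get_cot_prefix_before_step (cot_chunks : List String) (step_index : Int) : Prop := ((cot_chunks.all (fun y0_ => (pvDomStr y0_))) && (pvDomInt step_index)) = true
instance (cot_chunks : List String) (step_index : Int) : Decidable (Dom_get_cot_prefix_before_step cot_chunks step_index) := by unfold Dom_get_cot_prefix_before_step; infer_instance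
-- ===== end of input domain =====

-- B replaces A's count-and-break loop by a precomputed table of verification-chunk positions
-- plus a slice-and-join lookup (alternative decomposition, same cost).


-- ===== PORT A =====
-- shared module helper is_verification_chunk
def is_verification_chunk (chunk : String) : Bool :=
  let c := PySem.Str.strip chunk
  if !(PySem.Str.startswith c "Step") then false
  else if !(PySem.Str.isIn "\\boxed{" c) then false
  else true

-- A's 'for chunk in cot_chunks[1:]' loop with verification_count and break, as structural recursion
def pvLoopA (step_index : Int) : List String → Int → List String
  | [], _ => []
  | chunk :: rest, cnt =>
    if is_verification_chunk chunk then
      if cnt = step_index then []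
      else chunk :: pvLoopA step_index rest (cnt + 1)
    else chunk :: pvLoopA step_index rest cnt

def get_cot_prefix_before_step (cot_chunks : List String) (step_index : Int) : String :=
  PySem.Str.join "" (pvLoopA step_index (PySem.List.slice cot_chunks (some 1) none) 0)

-- ===== PORT B =====
-- the enumerate-comprehension: indices i (starting at base) of verification chunks
def pvPositions : List String → Nat → List Nat
  | [], _ => []
  | chunk :: rest, i =>
    if is_verification_chunk chunk then i :: pvPositions rest (i + 1)
    else pvPositions rest (i + 1)

def get_cot_prefix_before_step_alt (cot_chunks : List String) (step_index : Int) : String :=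
  let tail := PySem.List.slice cot_chunks (some 1) none
  let positions := pvPositions tail 0
  if 0 ≤ step_index ∧ step_index < (positions.length : Int) then
    PySem.Str.join "" (tail.take (positions.getD step_index.toNat 0))
  else
    PySem.Str.join "" tail

-- ===== PRECONDITION & SPEC =====
def Spec_get_cot_prefix_before_step (cot_chunks : List String) (step_index : Int) (out : String) : Prop := out = get_cot_prefix_before_step_alt cot_chunks step_index
instance (cot_chunks : List String) (step_index : Int) (out : String) : Decidable (Spec_get_cot_prefix_before_step cot_chunks step_index out) := by unfold Spec_get_cot_prefix_before_step; infer_instance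

-- ===== CLAIM (what is proved, stated in full; the proofs are below) =====
def Claim_equal_get_cot_prefix_before_step : Prop := ∀ (cot_chunks : List String) (step_index : Int), Dom_get_cot_prefix_before_step cot_chunks step_index → Spec_get_cot_prefix_before_step cot_chunks step_index (get_cot_prefix_before_step cot_chunks step_index)

-- ===== LEMMAS AND PROOFS =====
lemma pvPositions_shift (xs : List String) (i : Nat) :
    pvPositions xs (i + 1) = (pvPositions xs i).map (· + 1) := by
  induction xs generalizing i with
  | nil => simp [pvPositions]
  | cons c rest ih =>
    by_cases h : is_verification_chunk c <;> simp [pvPositions, h, ih]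

lemma pvLoopA_eq (xs : List String) (si : Int) : ∀ cnt : Int,
    pvLoopA si xs cnt =
      if 0 ≤ si - cnt ∧ si - cnt < ((pvPositions xs 0).length : Int) then
        xs.take ((pvPositions xs 0).getD (si - cnt).toNat 0)
      else xs := by
  induction xs with
  | nil => intro cnt; simp [pvLoopA, pvPositions]
  | cons c rest ih =>
    intro cnt
    by_cases hv : is_verification_chunk c
    · by_cases he : cnt = si
      · simp [pvLoopA, pvPositions, hv, he]
      · have hp : pvPositions (c :: rest) 0 = 0 :: (pvPositions rest 0).map (· + 1) := by
          simp [pvPositions, hv, pvPositions_shift]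
        simp only [pvLoopA, if_pos hv, if_neg he, ih (cnt + 1), hp]
        by_cases hc : 0 ≤ si - cnt ∧ si - cnt < ((0 :: (pvPositions rest 0).map (· + 1)).length : Int)
        · have h1 : 1 ≤ si - cnt := by
            have h0 := hc.1; omega
          have hc' : 0 ≤ si - (cnt + 1) ∧ si - (cnt + 1) < ((pvPositions rest 0).length : Int) := by
            simp only [List.length_cons, List.length_map] at hc
            constructor <;> [omega; (have := hc.2; push_cast at this ⊢; omega)]
          rw [if_pos hc', if_pos hc]
          have hlt : (si - (cnt + 1)).toNat < (pvPositions rest 0).length := by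
            have := hc'.2; omega
          have ht : (si - cnt).toNat = (si - (cnt + 1)).toNat + 1 := by omega
          rw [ht]
          simp [List.getD_eq_getElem?_getD, List.getElem?_map, List.getElem?_eq_getElem hlt]
        · have hc' : ¬ (0 ≤ si - (cnt + 1) ∧ si - (cnt + 1) < ((pvPositions rest 0).length : Int)) := by
            simp only [List.length_cons, List.length_map] at hc
            intro h; apply hc
            constructor
            · omega
            · have := h.2; push_cast at this ⊢; omega
          rw [if_neg hc', if_neg hc]
    · have hp : pvPositions (c :: rest) 0 = (pvPositions rest 0).map (· + 1) := by
        simp [pvPositions, hv, pvPositions_shift]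
      simp only [pvLoopA, if_neg hv, ih cnt, hp]
      by_cases hc : 0 ≤ si - cnt ∧ si - cnt < ((pvPositions rest 0).length : Int)
      · have hcm : 0 ≤ si - cnt ∧ si - cnt < (((pvPositions rest 0).map (· + 1)).length : Int) := by
          simpa using hc
        rw [if_pos hc, if_pos hcm]
        have hlt : (si - cnt).toNat < (pvPositions rest 0).length := by
          have := hc.2; omega
        simp [List.getD_eq_getElem?_getD, List.getElem?_map, List.getElem?_eq_getElem hlt]
      · have hcm : ¬ (0 ≤ si - cnt ∧ si - cnt < (((pvPositions rest 0).map (· + 1)).length : Int)) := by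
          simpa using hc
        rw [if_neg hc, if_neg hcm]

-- ===== VERDICT (by name: the statement is the Claim_ definition above) =====
theorem get_cot_prefix_before_step_spec : Claim_equal_get_cot_prefix_before_step := by
  intro cot_chunks step_index _
  unfold Spec_get_cot_prefix_before_step get_cot_prefix_before_step get_cot_prefix_before_step_alt
  rw [pvLoopA_eq]
  simp only [sub_zero]
  split <;> rfl
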